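-- pv_equiv track=rewrite | github.com/Exonware/xwapi | xwlazy/src/exonware/xwlazy.py | _generate_fallback_candidates
-- ===== SOURCE A (Python) =====
-- def _generate_fallback_candidates(fullname):
--     """
--     Generate fallback package name candidates from import name.
--     If a package is not found in xwlazy_external_libs.toml, try importing
--     using the same name with transformations:
--     - Replace dots with dashes
--     - Replace dots with underscores
--     - Progressively shorten by removing segments from the end
--     Examples:
--         "exonware.xwlazy.core_file" -> [
--             "exonware-xwlazy-core_file",
--             "exonware_xwlazy_core_file",
--             "exonware-xwlazy",
--             "exonware_xwlazy",
--             "exonware"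
--         ]
--         "something.something.something.something.something.something" -> [
--             "something-something-something-something-something-something",
--             "something_something_something_something_something_something",
--             "something-something-something-something-something",
--             "something_something_something_something_something",
--             ... (continues down to just "something")
--         ]
--     """
--     if not fullname or not isinstance(fullname, str):
--         return []
--     parts = fullname.split('.')
--     if not parts:
--         return []
--     candidates = []
--     # Generate progressively shorter versions, starting from full name
--     for length in range(len(parts), 0, -1):
--         segment = '.'.join(parts[:length])
--         # Try dash variant first
--         dash_version = segment.replace('.', '-')
--         candidates.append(dash_version)
--         # Try underscore variant (only if different from dash)
--         underscore_version = segment.replace('.', '_')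
--         if underscore_version != dash_version:
--             candidates.append(underscore_version)
--     return candidates
-- ===== SOURCE B (Python) =====
-- def _generate_fallback_candidates(fullname):
--     if not fullname or not isinstance(fullname, str):
--         return []
--     parts = fullname.split('.')
--     # Build both fully transformed strings once; per prefix we only slice.
--     dash_full = fullname.replace('.', '-')
--     underscore_full = fullname.replace('.', '_')
--     # ends[i] = character offset where the prefix of the first i+1 segments ends.
--     ends = []
--     total = -1
--     for p in parts:
--         total += len(p) + 1
--         ends.append(total)
--     out = []
--     for i in range(len(parts) - 1, -1, -1):
--         out.append(dash_full[:ends[i]])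
--         if i > 0:
--             out.append(underscore_full[:ends[i]])
--     return out
-- ===== Notes on version B (the rewrite author's own statement) =====
-- stated objective: alternative
-- what changed: Instead of re-joining and re-replacing each prefix per loop iteration, B builds the two fully transformed strings once, precomputes cumulative segment-end offsets, and emits each candidate as a slice of the full strings, with the underscore variant gated by segment count rather than string comparison.
import Mathlib
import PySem

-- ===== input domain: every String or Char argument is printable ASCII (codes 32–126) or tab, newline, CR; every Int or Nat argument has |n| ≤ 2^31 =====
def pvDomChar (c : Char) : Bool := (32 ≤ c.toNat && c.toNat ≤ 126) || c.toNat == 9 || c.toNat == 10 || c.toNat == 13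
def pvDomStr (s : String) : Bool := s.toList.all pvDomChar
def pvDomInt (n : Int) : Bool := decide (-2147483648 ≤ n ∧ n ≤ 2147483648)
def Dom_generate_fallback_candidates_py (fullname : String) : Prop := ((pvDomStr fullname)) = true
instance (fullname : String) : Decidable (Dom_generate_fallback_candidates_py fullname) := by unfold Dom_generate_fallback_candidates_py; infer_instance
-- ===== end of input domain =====

-- B builds the two fully transformed strings once and emits each candidate as a
-- slice at a precomputed segment-end offset, instead of re-joining and
-- re-replacing every prefix per iteration (objective: alternative decomposition).

-- ===== PORT A =====
def generate_fallback_candidates_py (fullname : String) : List String :=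
  if fullname = "" then []
  else
    -- fullname.split('.'): the separator "." is non-empty, so split? is always `some`
    let parts := (PySem.Str.split? fullname ".").getD []
    if parts = [] then []
    else
      (PySem.List.pyRange (parts.length : Int) 0 (-1)).foldl
        (fun candidates length =>
          let segment := PySem.Str.join "." (PySem.List.slice parts none (some length))
          let dash_version := PySem.Str.replace segment "." "-"
          let candidates := candidates ++ [dash_version]
          let underscore_version := PySem.Str.replace segment "." "_"
          if underscore_version ≠ dash_version then candidates ++ [underscore_version]
          else candidates) []

-- ===== PORT B =====
def generate_fallback_candidates_py_alt (fullname : String) : List String :=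
  if fullname = "" then []
  else
    -- fullname.split('.'): the separator "." is non-empty, so split? is always `some`
    let parts := (PySem.Str.split? fullname ".").getD []
    let dash_full := PySem.Str.replace fullname "." "-"
    let underscore_full := PySem.Str.replace fullname "." "_"
    let ends := (parts.foldl
      (fun (st : List Int × Int) p =>
        (st.1 ++ [st.2 + PySem.Str.len p + 1], st.2 + PySem.Str.len p + 1)) (([], -1) : List Int × Int)).1
    (PySem.List.pyRange ((parts.length : Int) - 1) (-1) (-1)).foldl
      (fun out i =>
        let e := PySem.List.pyGetD ends i 0
        let out := out ++ [PySem.Str.slice dash_full none (some e)]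
        if i > 0 then out ++ [PySem.Str.slice underscore_full none (some e)]
        else out) []

-- ===== PRECONDITION & SPEC =====
def Spec_generate_fallback_candidates_py (fullname : String) (out : List String) : Prop := out = generate_fallback_candidates_py_alt fullname
instance (fullname : String) (out : List String) : Decidable (Spec_generate_fallback_candidates_py fullname out) := by unfold Spec_generate_fallback_candidates_py; infer_instance

-- ===== CLAIM (what is proved, stated in full; the proofs are below) =====
def Claim_equal_generate_fallback_candidates_py : Prop := ∀ (fullname : String), Dom_generate_fallback_candidates_py fullname → Spec_generate_fallback_candidates_py fullname (generate_fallback_candidates_py fullname)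

-- ===== LEMMAS AND PROOFS =====

-- Per-iteration block of A's loop
def pvGA (parts : List String) (length : Int) : List String :=
  let segment := PySem.Str.join "." (PySem.List.slice parts none (some length))
  let dash_version := PySem.Str.replace segment "." "-"
  let underscore_version := PySem.Str.replace segment "." "_"
  if underscore_version ≠ dash_version then [dash_version, underscore_version] else [dash_version]

-- Per-iteration block of B's loop
def pvGB (dash_full underscore_full : String) (ends : List Int) (i : Int) : List String :=
  let e := PySem.List.pyGetD ends i 0
  if i > 0 then [PySem.Str.slice dash_full none (some e), PySem.Str.slice underscore_full none (some e)]
  else [PySem.Str.slice dash_full none (some e)]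

-- single-char replacement map
def pvRep (d e : Char) (c : Char) : Char := if c = d then e else c

-- sum of lengths of the first L pieces
def pvS (ps : List (List Char)) (L : Nat) : Nat := ((ps.take L).map List.length).sum

theorem pv_replace_go (d e : Char) (l : List Char) : ∀ (fuel : Nat) (acc : List Char),
    l.length ≤ fuel →
    PySem.Chars.replace.go [d] [e] fuel l acc = acc.reverse ++ l.map (pvRep d e) := by
  induction l with
  | nil =>
    intro fuel acc _
    cases fuel <;> simp [PySem.Chars.replace.go]
  | cons c t ih =>
    intro fuel acc h
    cases fuel with
    | zero => simp at h
    | succ fuel =>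
      by_cases hc : c = d
      · subst hc
        simp only [PySem.Chars.replace.go, List.isPrefixOf, BEq.rfl, Bool.true_and,
          List.isPrefixOf_nil_left, if_true, List.length_cons] at *
        rw [show List.drop (List.length ([] : List Char) + 1) (c :: t) = t from rfl]
        rw [ih fuel (List.reverse [e] ++ acc) (by omega)]
        simp [pvRep]
      · have hdc : (d == c) = false := by simp [BEq.comm]; exact fun h' => hc h'.symm
        simp only [PySem.Chars.replace.go, List.isPrefixOf, hdc, Bool.false_and, if_false]
        rw [ih fuel (c :: acc) (by simpa using Nat.le_of_succ_le_succ h)]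
        simp [pvRep, hc]

theorem pv_replace_single (cs : List Char) (d e : Char) :
    PySem.Chars.replace cs [d] [e] = cs.map (pvRep d e) := by
  simp [PySem.Chars.replace, pv_replace_go d e cs cs.length [] (le_refl _)]

theorem pv_splitOn_go (d : Char) (l : List Char) : ∀ (fuel : Nat) (cur : List Char) (acc : List (List Char)),
    l.length ≤ fuel →
    PySem.Chars.splitOn.go [d] fuel l cur acc
      = acc.reverse ++ List.modifyHead (cur.reverse ++ ·) (List.splitOn d l) := by
  induction l with
  | nil =>
    intro fuel cur acc _
    cases fuel <;> simp [PySem.Chars.splitOn.go, List.splitOn, List.splitOnP_nil]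
  | cons c t ih =>
    intro fuel cur acc h
    cases fuel with
    | zero => simp at h
    | succ fuel =>
      have ht : t.length ≤ fuel := by simpa using Nat.le_of_succ_le_succ h
      by_cases hc : c = d
      · subst hc
        simp only [PySem.Chars.splitOn.go, List.isPrefixOf, BEq.rfl, Bool.true_and,
          List.isPrefixOf_nil_left, if_true]
        rw [show List.drop [c].length (c :: t) = t from rfl]
        rw [ih fuel [] (cur.reverse :: acc) ht]
        simp [List.splitOn, List.splitOnP_cons]
        obtain ⟨p, ps, hps⟩ := List.exists_cons_of_ne_nil (List.splitOnP_ne_nil (· == c) t)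
        simp [hps]
      · have hdc : (d == c) = false := by simp [BEq.comm]; exact fun h' => hc h'.symm
        simp only [PySem.Chars.splitOn.go, List.isPrefixOf, hdc, Bool.false_and, if_false]
        rw [ih fuel (c :: cur) acc ht]
        have hne : (c == d) = false := by simpa using hc
        simp only [List.splitOn, List.splitOnP_cons, hne, if_false]
        obtain ⟨p, ps, hps⟩ := List.exists_cons_of_ne_nil (List.splitOnP_ne_nil (· == d) t)
        simp [hps, List.modifyHead]
  
theorem pv_splitOn_single (cs : List Char) (d : Char) :
    PySem.Chars.splitOn cs [d] = List.splitOn d cs := by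
  rw [PySem.Chars.splitOn, pv_splitOn_go d cs (cs.length + 1) [] [] (by omega)]
  obtain ⟨p, ps, hps⟩ := List.exists_cons_of_ne_nil (List.splitOnP_ne_nil (· == d) cs)
  simp [List.splitOn] at hps ⊢
  simp [hps, List.modifyHead]

theorem pv_splitOnP_no_p (p : Char → Bool) (cs : List Char) :
    ∀ x ∈ List.splitOnP p cs, ∀ c ∈ x, ¬ p c := by
  induction cs with
  | nil => simp [List.splitOnP_nil]
  | cons a t ih =>
    rw [List.splitOnP_cons]
    by_cases ha : p a
    · rw [if_pos ha]
      intro x hx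
      rw [List.mem_cons] at hx
      rcases hx with rfl | hx
      · simp
      · exact ih x hx
    · rw [if_neg ha]
      obtain ⟨q, qs, hqs⟩ := List.exists_cons_of_ne_nil (List.splitOnP_ne_nil p t)
      rw [hqs, List.modifyHead_cons]
      intro x hx
      rw [List.mem_cons] at hx
      rcases hx with rfl | hx
      · intro c hc
        rw [List.mem_cons] at hc
        rcases hc with rfl | hc
        · exact ha
        · exact ih q (by rw [hqs]; exact List.mem_cons_self) c hc
      · exact ih x (by rw [hqs]; exact List.mem_cons_of_mem q hx)

theorem pv_splitOn_no_dot (d : Char) (cs : List Char) :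
    ∀ x ∈ List.splitOn d cs, d ∉ x := by
  intro x hx hd
  exact pv_splitOnP_no_p (· == d) cs x hx d hd (by simp)

theorem pv_inter_cons2 (sep a b : List Char) (l : List (List Char)) :
    sep.intercalate (a::b::l) = a ++ sep ++ sep.intercalate (b::l) := by
  simp [List.intercalate]

theorem pv_inter_singleton (sep a : List Char) : sep.intercalate [a] = a := by
  simp [List.intercalate]

theorem pv_mem_dot (d : Char) (ps : List (List Char)) (hps : ∀ x ∈ ps, d ∉ x) :
    ∀ (L : Nat), 1 ≤ L → L ≤ ps.length → (d ∈ [d].intercalate (ps.take L) ↔ 2 ≤ L) := by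
  intro L h1 h2
  cases ps with
  | nil => simp at h2; omega
  | cons p t =>
    cases L with
    | zero => omega
    | succ L =>
      cases L with
      | zero =>
        simp only [List.take_succ_cons, List.take_zero, pv_inter_singleton]
        have := hps p (by simp)
        constructor
        · intro h; exact absurd h this
        · omega
      | succ L =>
        cases t with
        | nil => simp at h2
        | cons q s =>
          rw [List.take_succ_cons, List.take_succ_cons]
          rw [show (p :: q :: List.take L s) = p :: (q :: List.take L s) from rfl]
          rw [pv_inter_cons2]
          constructor
          · intro _; omega
          · intro _; simp

theorem pv_take_inter (d : Char) (ps : List (List Char)) :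
    ∀ (L : Nat), 1 ≤ L → L ≤ ps.length →
    ([d].intercalate ps).take (pvS ps L + (L - 1)) = [d].intercalate (ps.take L) := by
  induction ps with
  | nil => intro L h1 h2; simp at h2; omega
  | cons p t ih =>
    intro L h1 h2
    cases L with
    | zero => omega
    | succ L =>
      cases L with
      | zero =>
        simp only [pvS, List.take_succ_cons, List.take_zero, List.map_cons, List.map_nil,
          List.sum_cons, List.sum_nil, Nat.add_zero, Nat.succ_sub_one, pv_inter_singleton]
        cases t with
        | nil => simp [pv_inter_singleton]
        | cons q s =>
          rw [pv_inter_cons2]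
          rw [List.append_assoc, List.take_append]
          simp
      | succ L =>
        cases t with
        | nil => simp at h2
        | cons q s =>
          have ih' := ih (L + 1) (by omega) (by simpa using Nat.le_of_succ_le_succ h2)
          rw [pv_inter_cons2]
          have hS : pvS (p :: q :: s) (L + 2) + (L + 2 - 1)
              = (p ++ [d]).length + (pvS (q :: s) (L + 1) + (L + 1 - 1)) := by
            simp [pvS, List.take_succ_cons]
            omega
          rw [hS, List.take_append]
          rw [List.take_of_length_le (Nat.le_add_right _ _), Nat.add_sub_cancel_left]
          rw [ih']
          simp only [List.take_succ_cons]
          rw [pv_inter_cons2]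

theorem pv_pyRange_down (m : Nat) :
    PySem.List.pyRange (m : Int) 0 (-1) = (List.range m).map (fun k : Nat => (m : Int) - (k : Int)) := by
  cases m with
  | zero => simp [PySem.List.pyRange]
  | succ m =>
    rw [PySem.List.pyRange]
    have h0 : ¬ ((-1 : Int) = 0) := by norm_num
    have h1 : ¬ ((0:Int) < -1) := by norm_num
    have h2 : ((0:Int) < (m.succ : Int)) := by positivity
    simp only [h0, if_false, h1, if_pos h2]
    have h3 : ((((m.succ : Int)) - 0 + -(-1) - 1) / -(-1)).toNat = m.succ := by
      push_cast; omega
    rw [h3]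
    apply List.map_congr_left
    intro k _
    ring

theorem pv_pyRange_down' (m : Nat) :
    PySem.List.pyRange ((m : Int) - 1) (-1) (-1) = (List.range m).map (fun k : Nat => (m : Int) - 1 - (k : Int)) := by
  cases m with
  | zero => simp [PySem.List.pyRange]
  | succ m =>
    rw [PySem.List.pyRange]
    have h0 : ¬ ((-1 : Int) = 0) := by norm_num
    have h1 : ¬ ((0:Int) < -1) := by norm_num
    have h2 : ((-1:Int) < (m.succ : Int) - 1) := by push_cast; omega
    simp only [h0, if_false, h1, if_pos h2]
    have h3 : ((((m.succ : Int) - 1) - (-1) + -(-1) - 1) / -(-1)).toNat = m.succ := by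
      push_cast; omega
    rw [h3]
    apply List.map_congr_left
    intro k _
    ring

-- A's loop, reshaped as flatMap over its blocks
theorem pv_loopA (parts : List String) (l : List Int) : ∀ (acc : List String),
    l.foldl
      (fun candidates length =>
        let segment := PySem.Str.join "." (PySem.List.slice parts none (some length))
        let dash_version := PySem.Str.replace segment "." "-"
        let candidates := candidates ++ [dash_version]
        let underscore_version := PySem.Str.replace segment "." "_"
        if underscore_version ≠ dash_version then candidates ++ [underscore_version]
        else candidates) acc
    = acc ++ l.flatMap (pvGA parts) := by
  induction l with
  | nil => intro acc; simp
  | cons x t ih =>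
    intro acc
    rw [List.foldl_cons, ih, List.flatMap_cons]
    simp only [pvGA]
    split <;> simp

-- B's loop, reshaped as flatMap over its blocks
theorem pv_loopB (dash_full underscore_full : String) (ends : List Int) (l : List Int) :
    ∀ (acc : List String),
    l.foldl
      (fun out i =>
        let e := PySem.List.pyGetD ends i 0
        let out := out ++ [PySem.Str.slice dash_full none (some e)]
        if i > 0 then out ++ [PySem.Str.slice underscore_full none (some e)]
        else out) acc
    = acc ++ l.flatMap (pvGB dash_full underscore_full ends) := by
  induction l with
  | nil => intro acc; simp
  | cons x t ih =>
    intro acc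
    rw [List.foldl_cons, ih, List.flatMap_cons]
    simp only [pvGB]
    split <;> simp

-- B's offsets fold: the accumulated list of segment-end offsets
theorem pv_ends_spec (ps : List String) : ∀ (acc : List Int) (t : Int),
    (ps.foldl
      (fun (st : List Int × Int) p =>
        (st.1 ++ [st.2 + PySem.Str.len p + 1], st.2 + PySem.Str.len p + 1)) (acc, t)).1
    = acc ++ (List.range ps.length).map
        (fun j => t + (((ps.take (j+1)).map PySem.Str.len).sum + (j+1))) := by
  induction ps with
  | nil => intro acc t; simp
  | cons p ps ih =>
    intro acc t
    rw [List.foldl_cons, ih, List.length_cons, List.range_succ_eq_map, List.map_cons,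
      List.map_map, List.append_assoc, List.singleton_append]
    congr 1
    congr 1
    · simp only [List.take_succ_cons, List.take_zero, List.map_cons, List.map_nil,
        List.sum_cons, List.sum_nil, Nat.cast_zero]
      ring
    · apply List.map_congr_left
      intro j _
      simp only [Function.comp, List.take_succ_cons, List.map_cons, List.sum_cons]
      push_cast
      ring

-- sums of Python string lengths, pushed to the character level
theorem pv_len_sum (l : List String) :
    (l.map PySem.Str.len).sum = (((l.map String.toList).map List.length).sum : Int) := by
  induction l with
  | nil => simp
  | cons a t ih =>
    simp only [List.map_cons, List.sum_cons, ih, PySem.Str.len]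
    push_cast
    ring

-- the pointwise identity: A's block at length L equals B's block at index L-1
theorem pv_point (fullname : String) (parts : List String) (pcs : List (List Char))
    (ends : List Int)
    (hmap : parts.map String.toList = pcs)
    (hpcs : pcs = List.splitOn '.' fullname.toList)
    (LN : Nat) (h1 : 1 ≤ LN) (h2 : LN ≤ pcs.length)
    (hends : PySem.List.pyGetD ends ((LN : Int) - 1) 0 = (pvS pcs LN : Int) + (LN : Int) - 1) :
    pvGA parts (LN : Int)
      = pvGB (PySem.Str.replace fullname "." "-") (PySem.Str.replace fullname "." "_")
          ends ((LN : Int) - 1) := by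
  -- the segment, on the character level
  have hseg : (PySem.Str.join "." (PySem.List.slice parts none (some (LN : Int)))).toList
      = ['.'].intercalate (pcs.take LN) := by
    rw [PySem.List.slice_to_natCast, PySem.Str.toList_join,
        show ("." : String).toList = ['.'] from rfl, ← hmap, ← List.map_take]
    rfl
  -- a slice of a fully transformed string is the transformed segment
  have hfull : ∀ (e : Char),
      (PySem.Str.slice (PySem.Str.replace fullname "." (String.ofList [e])) none
        (some ((pvS pcs LN : Int) + (LN : Int) - 1))).toList
      = (['.'].intercalate (pcs.take LN)).map (pvRep '.' e) := by
    intro e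
    rw [PySem.Str.toList_slice, PySem.Chars.slice, PySem.Str.toList_replace,
        show ("." : String).toList = ['.'] from rfl, String.toList_ofList, pv_replace_single,
        PySem.List.slice_to _ (by omega : (0:Int) ≤ (pvS pcs LN : Int) + (LN : Int) - 1),
        show ((pvS pcs LN : Int) + (LN : Int) - 1).toNat = pvS pcs LN + (LN - 1) from by omega,
        ← List.map_take]
    congr 1
    rw [show fullname.toList = ['.'].intercalate pcs from by rw [hpcs, List.intercalate_splitOn]]
    exact pv_take_inter '.' pcs LN h1 (by omega)
  have hdash : PySem.Str.replace (PySem.Str.join "." (PySem.List.slice parts none (some (LN : Int)))) "." "-"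
      = PySem.Str.slice (PySem.Str.replace fullname "." "-") none
          (some ((pvS pcs LN : Int) + (LN : Int) - 1)) := by
    have h := hfull '-'
    rw [show String.ofList ['-'] = "-" from rfl] at h
    rw [← String.toList_inj, h, PySem.Str.toList_replace, hseg,
        show ("." : String).toList = ['.'] from rfl,
        show ("-" : String).toList = ['-'] from rfl, pv_replace_single]
  have hus : PySem.Str.replace (PySem.Str.join "." (PySem.List.slice parts none (some (LN : Int)))) "." "_"
      = PySem.Str.slice (PySem.Str.replace fullname "." "_") none
          (some ((pvS pcs LN : Int) + (LN : Int) - 1)) := by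
    have h := hfull '_'
    rw [show String.ofList ['_'] = "_" from rfl] at h
    rw [← String.toList_inj, h, PySem.Str.toList_replace, hseg,
        show ("." : String).toList = ['.'] from rfl,
        show ("_" : String).toList = ['_'] from rfl, pv_replace_single]
  -- the guard: the variants differ exactly when the prefix spans ≥ 2 segments
  have hnd : ∀ x ∈ pcs, '.' ∉ x := by
    rw [hpcs]; exact pv_splitOn_no_dot '.' fullname.toList
  have hguard : (PySem.Str.replace (PySem.Str.join "." (PySem.List.slice parts none (some (LN : Int)))) "." "_"
        ≠ PySem.Str.replace (PySem.Str.join "." (PySem.List.slice parts none (some (LN : Int)))) "." "-")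
      ↔ 2 ≤ LN := by
    rw [ne_eq, ← String.toList_inj, PySem.Str.toList_replace, PySem.Str.toList_replace, hseg,
        show ("." : String).toList = ['.'] from rfl,
        show ("-" : String).toList = ['-'] from rfl,
        show ("_" : String).toList = ['_'] from rfl,
        pv_replace_single, pv_replace_single,
        ← pv_mem_dot '.' pcs hnd LN h1 (by omega)]
    constructor
    · intro hne
      by_contra hmem
      apply hne
      apply List.map_congr_left
      intro c hc
      have hcne : c ≠ '.' := fun h => hmem (h ▸ hc)
      simp [pvRep, hcne]
    · intro hmem hEq
      rw [List.map_inj_left] at hEq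
      have := hEq '.' hmem
      simp [pvRep] at this
  -- assemble
  simp only [pvGA, pvGB]
  rw [hdash, hus] at hguard
  rw [hends, hdash, hus]
  by_cases hL : 2 ≤ LN
  · rw [if_pos (hguard.mpr hL), if_pos (by omega : ((LN : Int) - 1) > 0)]
  · rw [if_neg (fun h => hL (hguard.mp h)), if_neg (by omega : ¬ ((LN : Int) - 1) > 0)]

-- ===== VERDICT (by name: the statement is the Claim_ definition above) =====
theorem generate_fallback_candidates_py_spec : Claim_equal_generate_fallback_candidates_py := by
  intro fullname _
  unfold Spec_generate_fallback_candidates_py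
  unfold generate_fallback_candidates_py generate_fallback_candidates_py_alt
  by_cases hemp : fullname = ""
  · simp [hemp]
  · rw [if_neg hemp, if_neg hemp]
    -- identify the parts
    have hsome : PySem.Chars.split? fullname.toList ("." : String).toList
        = some (List.splitOn '.' fullname.toList) := by
      rw [show ("." : String).toList = ['.'] from rfl, PySem.Chars.split?]
      simp [pv_splitOn_single]
    have hbridge := PySem.Str.split?_map fullname "."
    rw [hsome] at hbridge
    obtain ⟨parts, hp, hmap⟩ : ∃ parts, PySem.Str.split? fullname "." = some parts ∧
        parts.map String.toList = List.splitOn '.' fullname.toList := by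
      cases hsp : PySem.Str.split? fullname "." with
      | none => rw [hsp] at hbridge; simp at hbridge
      | some parts => rw [hsp] at hbridge; simp at hbridge; exact ⟨parts, rfl, hbridge⟩
    rw [hp]
    simp only [Option.getD_some]
    have hnnil : List.splitOn '.' fullname.toList ≠ [] := List.splitOnP_ne_nil _ _
    have hlen : parts.length = (List.splitOn '.' fullname.toList).length := by
      rw [← hmap, List.length_map]
    have hpne : ¬ (parts = []) := by
      intro h
      rw [h] at hmap
      exact hnnil (by rw [← hmap]; rfl)
    rw [if_neg hpne]
    -- both loops as flatMaps over descending ranges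
    rw [pv_loopA, pv_loopB, List.nil_append, List.nil_append]
    rw [pv_ends_spec parts [] (-1), List.nil_append]
    rw [pv_pyRange_down parts.length, pv_pyRange_down' parts.length]
    rw [List.flatMap_map, List.flatMap_map]
    apply List.flatMap_congr
    intro k hk
    rw [List.mem_range] at hk
    have hLcast : ((parts.length : Int) - (k : Int)) = ((parts.length - k : Nat) : Int) := by omega
    have hLcast' : ((parts.length : Int) - 1 - (k : Int)) = (((parts.length - k : Nat) : Int) - 1) := by
      omega
    rw [hLcast, hLcast']
    apply pv_point fullname parts (List.splitOn '.' fullname.toList) _ hmap rfl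
      (parts.length - k) (by omega) (by omega)
    -- the offset B reads at this index
    rw [show (((parts.length - k : Nat) : Int) - 1) = ((parts.length - k - 1 : Nat) : Int) from by omega,
        PySem.List.pyGetD_natCast, List.getD_eq_getElem?_getD, List.getElem?_map,
        List.getElem?_range (by omega : parts.length - k - 1 < parts.length)]
    simp only [Option.map_some, Option.getD_some]
    rw [show (parts.length - k - 1) + 1 = parts.length - k from by omega,
        pv_len_sum, List.map_take, hmap]
    have hS : ((List.map List.length (List.take (parts.length - k) (List.splitOn '.' fullname.toList))).sum : Int)
        = ((pvS (List.splitOn '.' fullname.toList) (parts.length - k) : Nat) : Int) := rfl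
    rw [hS]
    omega
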